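-- pv_equiv track=rewrite | github.com/prappleizer/refsync | src/refsync/services/ads.py | _parse_bibtex_entries
-- ===== SOURCE A (Python) =====
-- def _parse_bibtex_entries(
--     bibtex_str: str, bibcodes: list[str]
-- ) -> dict[str, str]:
--     """Parse a combined BibTeX string into individual entries by bibcode."""
--     results = {}
--
--     # Split on @ARTICLE, @INPROCEEDINGS, etc.
--     # Each entry starts with @ and ends before the next @ or end of string
--     entries = []
--     current_entry = []
--
--     for line in bibtex_str.split("\n"):
--         if line.strip().startswith("@") and current_entry:
--             entries.append("\n".join(current_entry))
--             current_entry = []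
--         current_entry.append(line)
--
--     if current_entry:
--         entries.append("\n".join(current_entry))
--
--     # Match entries to bibcodes
--     for entry in entries:
--         entry = entry.strip()
--         if not entry:
--             continue
--
--         # Extract the cite key (first thing after @TYPE{)
--         for bibcode in bibcodes:
--             # ADS uses bibcode as cite key
--             if bibcode in entry:
--                 results[bibcode] = entry
--                 break
--
--     return results
-- ===== SOURCE B (Python) =====
-- def _parse_bibtex_entries(
--     bibtex_str: str, bibcodes: list[str]
-- ) -> dict[str, str]:
--     """Parse a combined BibTeX string into individual entries by bibcode.
--
--     Re-implementation by staged index arithmetic instead of an accumulator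
--     loop: first compute the cut positions (every "@"-header line except a
--     header at line 0), then materialise each entry as a slice between
--     consecutive bounds, and key it by the first listed bibcode it contains.
--     """
--     lines = bibtex_str.split("\n")
--     cuts = [i for i, ln in enumerate(lines) if i > 0 and ln.strip().startswith("@")]
--     bounds = [0] + cuts + [len(lines)]
--     results = {}
--     for lo, hi in zip(bounds, bounds[1:]):
--         stripped = "\n".join(lines[lo:hi]).strip()
--         if stripped:
--             match = next((b for b in bibcodes if b in stripped), None)
--             if match is not None:
--                 results[match] = stripped
--     return results
-- ===== Notes on version B (the rewrite author's own statement) =====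
-- stated objective: alternative
-- what changed: B replaces A's single accumulator-with-flush loop by staged index arithmetic: it first computes the list of cut positions (indices of '@'-header lines other than line 0), forms the bounds list, and materialises each entry as a slice lines[lo:hi] between consecutive bounds; the entry is keyed by the first listed bibcode it contains (next() over a generator).
import Mathlib
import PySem

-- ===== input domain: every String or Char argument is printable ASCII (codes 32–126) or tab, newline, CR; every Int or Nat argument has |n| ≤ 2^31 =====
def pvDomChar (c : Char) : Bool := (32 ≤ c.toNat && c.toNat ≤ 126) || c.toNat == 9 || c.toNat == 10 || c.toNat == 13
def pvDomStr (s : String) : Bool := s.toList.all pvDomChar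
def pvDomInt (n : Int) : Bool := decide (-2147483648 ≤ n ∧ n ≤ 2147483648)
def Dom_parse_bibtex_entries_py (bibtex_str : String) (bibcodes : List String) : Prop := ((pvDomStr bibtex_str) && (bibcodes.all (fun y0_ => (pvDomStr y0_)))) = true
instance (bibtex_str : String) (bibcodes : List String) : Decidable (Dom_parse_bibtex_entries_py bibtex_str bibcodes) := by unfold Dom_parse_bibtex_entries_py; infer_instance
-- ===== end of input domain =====

-- B computes the '@'-header cut indices first and slices the line list between consecutive
-- bounds (staged passes) instead of A's accumulator-with-flush loop; alternative decomposition,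
-- same asymptotic cost. A = B proved exactly.
-- ===== PORT A =====
-- is this line's stripped form an entry header ("@..." line)?
def pvIsAt (line : String) : Bool :=
  PySem.Str.startswith (PySem.Str.strip line) "@"

-- A's loop body: flush current entry when an "@"-line follows a nonempty current block
def pvStepA (st : List String × List String) (line : String) : List String × List String :=
  let (entries, cur) := st
  if pvIsAt line && !cur.isEmpty then
    (entries ++ [PySem.Str.join "\n" cur], [] ++ [line])
  else
    (entries, cur ++ [line])

-- A's inner 'for bibcode in bibcodes: … break' loop
def pvFindA (bibcodes : List String) (entry : String) : Option String :=
  match bibcodes with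
  | [] => none
  | b :: rest => if PySem.Str.isIn b entry then some b else pvFindA rest entry

def parse_bibtex_entries_py (bibtex_str : String) (bibcodes : List String) : List (String × String) :=
  let lines := (PySem.Str.split? bibtex_str "\n").getD []
  let st := lines.foldl pvStepA ([], [])
  let entries := if st.2.isEmpty then st.1 else st.1 ++ [PySem.Str.join "\n" st.2]
  let results : PySem.Dict String String := entries.foldl (fun d entry =>
    let e := PySem.Str.strip entry
    if e == "" then d
    else
      match pvFindA bibcodes e with
      | some b => d.insert b e
      | none => d) PySem.Dict.empty
  results.items

-- ===== PORT B =====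
def parse_bibtex_entries_py_alt (bibtex_str : String) (bibcodes : List String) : List (String × String) :=
  let lines := (PySem.Str.split? bibtex_str "\n").getD []
  -- cuts = [i for i, ln in enumerate(lines) if i > 0 and ln.strip().startswith("@")]
  let cuts := ((PySem.List.enumerate lines 0).filter
      (fun p => decide (0 < p.1) && pvIsAt p.2)).map (fun p => p.1)
  -- bounds = [0] + cuts + [len(lines)]
  let bounds : List Int := 0 :: cuts ++ [(lines.length : Int)]
  -- for lo, hi in zip(bounds, bounds[1:]): …
  let results : PySem.Dict String String :=
    (bounds.zip (PySem.List.slice bounds (some 1) none)).foldl (fun d p =>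
      let stripped := PySem.Str.strip
        (PySem.Str.join "\n" (PySem.List.slice lines (some p.1) (some p.2)))
      if stripped == "" then d
      else
        match bibcodes.find? (fun b => PySem.Str.isIn b stripped) with
        | none => d
        | some m => d.insert m stripped) PySem.Dict.empty
  results.items

-- ===== PRECONDITION & SPEC =====
def Spec_parse_bibtex_entries_py (bibtex_str : String) (bibcodes : List String) (out : List (String × String)) : Prop := out = parse_bibtex_entries_py_alt bibtex_str bibcodes
instance (bibtex_str : String) (bibcodes : List String) (out : List (String × String)) : Decidable (Spec_parse_bibtex_entries_py bibtex_str bibcodes out) := by unfold Spec_parse_bibtex_entries_py; infer_instance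

-- ===== CLAIM (what is proved, stated in full; the proofs are below) =====
def Claim_equal_parse_bibtex_entries_py : Prop := ∀ (bibtex_str : String) (bibcodes : List String), Dom_parse_bibtex_entries_py bibtex_str bibcodes → Spec_parse_bibtex_entries_py bibtex_str bibcodes (parse_bibtex_entries_py bibtex_str bibcodes)

-- ===== LEMMAS AND PROOFS =====

-- the entries a block of lines yields: cur is the (nonempty) group being built,
-- a new group starts at every later "@"-line
def pvGroups : List String → List String → List String
  | cur, [] => [PySem.Str.join "\n" cur]
  | cur, x :: r =>
    if pvIsAt x then PySem.Str.join "\n" cur :: pvGroups [x] r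
    else pvGroups (cur ++ [x]) r

-- the lines before the first "@"-line
def pvPre (lines : List String) : List String := lines.takeWhile (fun x => !pvIsAt x)

-- the entries of the suffix starting at the first "@"-line
def pvSufGroups : List String → List String
  | [] => []
  | x :: r => if pvIsAt x then pvGroups [x] r else pvSufGroups r

-- indices (offset k) of the "@"-lines of a block
def pvCuts : Nat → List String → List Nat
  | _, [] => []
  | k, y :: t => if pvIsAt y then k :: pvCuts (k+1) t else pvCuts (k+1) t

-- the chunk list cut out of L by consecutive bounds lo, cs…, L.length
def pvChunks2 (L : List String) : Nat → List Nat → List (List String)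
  | lo, [] => [(L.drop lo).take (L.length - lo)]
  | lo, c :: cs => (L.drop lo).take (c - lo) :: pvChunks2 L c cs

-- direct recursive chunking: head line plus following non-"@" lines, then recurse
def pvSplitChunks : List String → List (List String)
  | [] => []
  | x :: r =>
    (x :: r.takeWhile (fun y => !pvIsAt y)) :: pvSplitChunks (r.dropWhile (fun y => !pvIsAt y))
termination_by l => l.length
decreasing_by
  simp only [List.length_cons]
  exact Nat.lt_succ_of_le (List.length_dropWhile_le _ _)

lemma pvSplitChunks_nil : pvSplitChunks [] = [] := by rw [pvSplitChunks]

lemma pvSplitChunks_cons (x : String) (r : List String) :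
    pvSplitChunks (x :: r) =
      (x :: r.takeWhile (fun y => !pvIsAt y)) :: pvSplitChunks (r.dropWhile (fun y => !pvIsAt y)) := by
  rw [pvSplitChunks]

lemma pvGroups_eq (r : List String) : ∀ cur,
    pvGroups cur r = PySem.Str.join "\n" (cur ++ pvPre r) :: pvSufGroups r := by
  induction r with
  | nil => intro cur; simp [pvGroups, pvPre, pvSufGroups]
  | cons x r ih =>
    intro cur
    by_cases h : pvIsAt x = true <;>
      simp [pvGroups, pvPre, pvSufGroups, h, ih]

lemma pvFoldA_eq (lines : List String) : ∀ acc cur, cur ≠ [] →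
    (lines.foldl pvStepA (acc, cur)).2 ≠ [] ∧
    (lines.foldl pvStepA (acc, cur)).1 ++
        [PySem.Str.join "\n" (lines.foldl pvStepA (acc, cur)).2] =
      acc ++ pvGroups cur lines := by
  induction lines with
  | nil => intro acc cur hc; simpa [pvGroups] using hc
  | cons x r ih =>
    intro acc cur hc
    have hcur : cur.isEmpty = false := by simpa [List.isEmpty_iff] using hc
    rw [List.foldl_cons]
    by_cases h : pvIsAt x = true
    · rw [show pvStepA (acc, cur) x = (acc ++ [PySem.Str.join "\n" cur], [x]) from by
        simp [pvStepA, h, hcur]]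
      obtain ⟨h1, h2⟩ := ih (acc ++ [PySem.Str.join "\n" cur]) [x] (by simp)
      exact ⟨h1, by rw [h2]; simp [pvGroups, h]⟩
    · rw [show pvStepA (acc, cur) x = (acc, cur ++ [x]) from by simp [pvStepA, h]]
      obtain ⟨h1, h2⟩ := ih acc (cur ++ [x]) (by simp)
      exact ⟨h1, by rw [h2]; simp [pvGroups, h]⟩

lemma pvSuf_eq : ∀ (n : Nat) (r : List String), r.length ≤ n →
    pvSufGroups r =
      (pvSplitChunks (r.dropWhile (fun y => !pvIsAt y))).map (PySem.Str.join "\n") := by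
  intro n
  induction n with
  | zero =>
    intro r hr
    have : r = [] := List.length_eq_zero_iff.mp (Nat.le_zero.mp hr)
    subst this
    simp [pvSufGroups, pvSplitChunks_nil]
  | succ n ih =>
    intro r hr
    cases r with
    | nil => simp [pvSufGroups, pvSplitChunks_nil]
    | cons x t =>
      have ht : t.length ≤ n := Nat.le_of_succ_le_succ (by simpa using hr)
      by_cases h : pvIsAt x = true
      · rw [show (x :: t).dropWhile (fun y => !pvIsAt y) = x :: t from by simp [h]]
        rw [pvSplitChunks_cons]
        have hs : pvSufGroups (x :: t) = pvGroups [x] t := by simp [pvSufGroups, h]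
        rw [hs, pvGroups_eq, ih t ht]
        simp [pvPre]
      · rw [show (x :: t).dropWhile (fun y => !pvIsAt y) = t.dropWhile (fun y => !pvIsAt y) from by
          simp [h]]
        have hs : pvSufGroups (x :: t) = pvSufGroups t := by simp [pvSufGroups, h]
        rw [hs]
        exact ih t ht

lemma pvGroups_splitChunks (x : String) (r : List String) :
    pvGroups [x] r = (pvSplitChunks (x :: r)).map (PySem.Str.join "\n") := by
  rw [pvGroups_eq, pvSplitChunks_cons, List.map_cons, pvSuf_eq r.length r le_rfl]
  simp [pvPre]

lemma pvCuts_ge : ∀ (t : List String) (k c : Nat), c ∈ pvCuts k t → k ≤ c := by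
  intro t
  induction t with
  | nil => intro k c hc; simp [pvCuts] at hc
  | cons y t ih =>
    intro k c hc
    by_cases h : pvIsAt y = true
    · simp [pvCuts, h] at hc
      rcases hc with rfl | hc
      · exact le_rfl
      · exact Nat.le_of_succ_le (ih (k+1) c hc)
    · simp [pvCuts, h] at hc
      exact Nat.le_of_succ_le (ih (k+1) c hc)

lemma pvChunks2_cons (L : List String) (lo : Nat) (y : String) (cs : List Nat)
    (h : L.drop lo = y :: L.drop (lo+1)) (hcs : ∀ c ∈ cs, lo < c) :
    pvChunks2 L lo cs = match pvChunks2 L (lo+1) cs with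
      | [] => []
      | ch :: rest => (y :: ch) :: rest := by
  have hlo : lo < L.length := by
    by_contra hge
    rw [List.drop_eq_nil_of_le (by omega)] at h
    simp at h
  cases cs with
  | nil =>
    simp only [pvChunks2]
    rw [h, show L.length - lo = (L.length - (lo+1)) + 1 from by omega, List.take_succ_cons]
  | cons c cs' =>
    have hc : lo < c := hcs c (by simp)
    simp only [pvChunks2]
    rw [h, show c - lo = (c - (lo+1)) + 1 from by omega, List.take_succ_cons]

lemma pvChunks2_eq : ∀ (t L : List String) (lo : Nat) (y : String),
    L.drop lo = y :: t →
    pvChunks2 L lo (pvCuts (lo+1) t) = pvSplitChunks (y :: t) := by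
  intro t
  induction t with
  | nil =>
    intro L lo y h
    have hlen : L.length - lo = 1 := by
      have := congrArg List.length h
      simpa using this
    simp only [pvCuts, pvChunks2, hlen, h]
    simp [pvSplitChunks_cons, pvSplitChunks_nil]
  | cons z t' ih =>
    intro L lo y h
    have hdrop : L.drop (lo+1) = z :: t' := by
      have h2 := congrArg List.tail h
      simpa [List.tail_drop] using h2
    by_cases hz : pvIsAt z = true
    · rw [show pvCuts (lo+1) (z :: t') = (lo+1) :: pvCuts (lo+2) t' from by simp [pvCuts, hz]]
      simp only [pvChunks2]
      rw [show pvCuts (lo + 2) t' = pvCuts ((lo+1)+1) t' from rfl, ih L (lo+1) z hdrop]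
      rw [h, show lo + 1 - lo = 1 from by omega, List.take_succ_cons, List.take_zero]
      conv_rhs => rw [pvSplitChunks_cons]
      rw [show (z :: t').takeWhile (fun y => !pvIsAt y) = [] from by simp [hz],
        show (z :: t').dropWhile (fun y => !pvIsAt y) = z :: t' from by simp [hz]]
    · rw [show pvCuts (lo+1) (z :: t') = pvCuts (lo+2) t' from by simp [pvCuts, hz]]
      rw [pvChunks2_cons L lo y (pvCuts (lo+2) t')
        (by rw [h, hdrop]) (fun c hc => by have := pvCuts_ge t' (lo+2) c hc; omega)]
      rw [show pvCuts (lo + 2) t' = pvCuts ((lo+1)+1) t' from rfl, ih L (lo+1) z hdrop]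
      rw [pvSplitChunks_cons, pvSplitChunks_cons]
      simp [hz]

lemma pvEnumCuts : ∀ (t : List String) (k : Nat),
    ((PySem.List.enumerate t ((k:Int)+1)).filter
        (fun p => decide (0 < p.1) && pvIsAt p.2)).map (fun p => p.1)
      = (pvCuts (k+1) t).map (fun n : Nat => (n : Int)) := by
  intro t
  induction t with
  | nil => intro k; simp [PySem.List.enumerate_nil, pvCuts]
  | cons y t ih =>
    intro k
    rw [PySem.List.enumerate_cons]
    have hcast : ((k:Int)+1)+1 = (((k+1:Nat)):Int)+1 := by push_cast; ring
    by_cases h : pvIsAt y = true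
    · rw [List.filter_cons_of_pos
        (by simp only [h, Bool.and_true, decide_eq_true_eq]; omega)]
      rw [List.map_cons, hcast, ih (k+1)]
      rw [show pvCuts (k+1) (y :: t) = (k+1) :: pvCuts (k+2) t from by simp [pvCuts, h]]
      rw [List.map_cons]
      push_cast
      ring_nf
    · rw [List.filter_cons_of_neg (by simp [h])]
      rw [show pvCuts (k+1) (y :: t) = pvCuts (k+2) t from by simp [pvCuts, h]]
      rw [hcast, ih (k+1)]

lemma pvMapZip (L : List String) : ∀ (cs : List Nat) (lo : Nat),
    ((((lo:Int) :: cs.map (fun n : Nat => (n : Int)) ++ [(L.length : Int)]).zip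
        (cs.map (fun n : Nat => (n : Int)) ++ [(L.length : Int)])).map
      (fun p => PySem.Str.join "\n" (PySem.List.slice L (some p.1) (some p.2))))
    = (pvChunks2 L lo cs).map (PySem.Str.join "\n") := by
  intro cs
  induction cs with
  | nil =>
    intro lo
    simp only [List.map_nil, List.nil_append, List.cons_append, List.zip_cons_cons,
      List.zip_nil_right, List.map_cons, List.map_nil, pvChunks2]
    rw [PySem.List.slice_natCast]
  | cons c cs' ih =>
    intro lo
    simp only [List.map_cons, List.cons_append, List.zip_cons_cons, pvChunks2]
    rw [PySem.List.slice_natCast]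
    congr 1
    exact ih c

lemma pvFindA_filter (bibcodes : List String) (e : String) :
    pvFindA bibcodes e = bibcodes.find? (fun b => PySem.Str.isIn b e) := by
  induction bibcodes with
  | nil => rfl
  | cons b rest ih =>
    cases h : PySem.Str.isIn b e <;>
      simp_all [pvFindA]

def pvBodyA (bibcodes : List String) (d : PySem.Dict String String) (entry : String) :
    PySem.Dict String String :=
  let e := PySem.Str.strip entry
  if e == "" then d
  else
    match pvFindA bibcodes e with
    | some b => d.insert b e
    | none => d

def pvBodyMatch (bibcodes : List String) (d : PySem.Dict String String) (s : String) :
    PySem.Dict String String :=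
  let stripped := PySem.Str.strip s
  if stripped == "" then d
  else
    match bibcodes.find? (fun b => PySem.Str.isIn b stripped) with
    | none => d
    | some m => d.insert m stripped

lemma pvBody_eq (bibcodes : List String) : pvBodyA bibcodes = pvBodyMatch bibcodes := by
  funext d s
  unfold pvBodyA pvBodyMatch
  by_cases h : PySem.Str.strip s == ""
  · simp [h]
  · simp only [h, Bool.false_eq_true, if_false]
    rw [pvFindA_filter]
    cases List.find? (fun b => PySem.Str.isIn b (PySem.Str.strip s)) bibcodes <;> rfl

lemma pvMapZip0 (L : List String) (cs : List Nat) :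
    ((((0:Int) :: cs.map (fun n : Nat => (n : Int)) ++ [(L.length : Int)]).zip
        (cs.map (fun n : Nat => (n : Int)) ++ [(L.length : Int)])).map
      (fun p => PySem.Str.join "\n" (PySem.List.slice L (some p.1) (some p.2))))
    = (pvChunks2 L 0 cs).map (PySem.Str.join "\n") := by
  have h := pvMapZip L cs 0
  norm_num at h
  exact h

lemma pvMain (L bibcodes : List String) :
    ((if (L.foldl pvStepA ([], [])).2.isEmpty then (L.foldl pvStepA ([], [])).1
      else (L.foldl pvStepA ([], [])).1 ++
        [PySem.Str.join "\n" (L.foldl pvStepA ([], [])).2]).foldl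
        (pvBodyA bibcodes) PySem.Dict.empty).items
    =
    ((((0:Int) :: ((PySem.List.enumerate L 0).filter
            (fun p => decide (0 < p.1) && pvIsAt p.2)).map (fun p => p.1) ++
          [(L.length : Int)]).zip
        (PySem.List.slice
          ((0:Int) :: ((PySem.List.enumerate L 0).filter
              (fun p => decide (0 < p.1) && pvIsAt p.2)).map (fun p => p.1) ++
            [(L.length : Int)]) (some 1) none)).foldl
        (fun d p => pvBodyMatch bibcodes d
          (PySem.Str.join "\n" (PySem.List.slice L (some p.1) (some p.2))))
        PySem.Dict.empty).items := by
  rw [PySem.List.slice_from_one,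
    show ((0:Int) :: ((PySem.List.enumerate L 0).filter
          (fun p => decide (0 < p.1) && pvIsAt p.2)).map (fun p => p.1) ++
        [(L.length : Int)]).tail
      = ((PySem.List.enumerate L 0).filter
          (fun p => decide (0 < p.1) && pvIsAt p.2)).map (fun p => p.1) ++
        [(L.length : Int)] from rfl]
  cases L with
  | nil => rfl
  | cons x r =>
    -- A side: entries = pvGroups [x] r
    have hstep : pvStepA ([], []) x = ([], [x]) := by simp [pvStepA]
    obtain ⟨h1, h2⟩ := pvFoldA_eq r [] [x] (by simp)
    have h1' : ((x :: r).foldl pvStepA ([], [])).2.isEmpty = false := by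
      rw [List.foldl_cons, hstep]
      simpa [List.isEmpty_iff] using h1
    rw [h1']
    simp only [Bool.false_eq_true, if_false]
    rw [List.foldl_cons, hstep, h2, List.nil_append]
    -- B side: cuts list
    rw [PySem.List.enumerate_cons, List.filter_cons_of_neg (by simp)]
    rw [show (0:Int) + 1 = ((0:Nat):Int) + 1 from by norm_num, pvEnumCuts r 0]
    -- fold over pairs = fold over mapped entry strings
    rw [show (((0:Int) :: (pvCuts (0+1) r).map (fun n : Nat => (n : Int)) ++
          [((x :: r).length : Int)]).zip
          ((pvCuts (0+1) r).map (fun n : Nat => (n : Int)) ++ [((x :: r).length : Int)])).foldl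
          (fun d p => pvBodyMatch bibcodes d
            (PySem.Str.join "\n" (PySem.List.slice (x :: r) (some p.1) (some p.2))))
          PySem.Dict.empty
        = ((((0:Int) :: (pvCuts (0+1) r).map (fun n : Nat => (n : Int)) ++
            [((x :: r).length : Int)]).zip
            ((pvCuts (0+1) r).map (fun n : Nat => (n : Int)) ++ [((x :: r).length : Int)])).map
            (fun p => PySem.Str.join "\n" (PySem.List.slice (x :: r) (some p.1) (some p.2)))).foldl
            (pvBodyMatch bibcodes) PySem.Dict.empty
      from List.foldl_map.symm]
    rw [pvMapZip0 (x :: r) (pvCuts (0+1) r),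
      pvChunks2_eq r (x :: r) 0 x (by simp), ← pvGroups_splitChunks, pvBody_eq]

-- ===== VERDICT (by name: the statement is the Claim_ definition above) =====
theorem parse_bibtex_entries_py_spec : Claim_equal_parse_bibtex_entries_py := by
  intro bibtex_str bibcodes _
  unfold Spec_parse_bibtex_entries_py parse_bibtex_entries_py parse_bibtex_entries_py_alt
  exact pvMain ((PySem.Str.split? bibtex_str "\n").getD []) bibcodes
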